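-- pv_equiv track=rewrite | github.com/kjmyers/AdventOfCode2024 | Day2/day2part2.py | dampDiff
-- ===== SOURCE A (Python) =====
-- def diff(numbers):
--     deltas = []
--     for i in range(1,len(numbers)):
--         dif = abs(numbers[i] - numbers[i-1])
--         if 0 < dif < 4:
--             deltas.append(True)
--         else:
--             deltas.append(False)
--     return all(deltas)
--
-- def dampDiff(numbers):
--     checks = len(numbers)
--     if diff(numbers):
--         return True, numbers
--     for position in range(checks):
--         modified_numbers = [
--             number for pos, number in enumerate(numbers) if pos != position
--         ]
--         if diff(modified_numbers):
--             return True, modified_numbers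
--     return False, numbers
-- ===== SOURCE B (Python) =====
-- def _valid(nums):
--     return all(1 <= abs(b - a) <= 3 for a, b in zip(nums, nums[1:]))
--
-- def _first_bad(nums):
--     for k, (a, b) in enumerate(zip(nums, nums[1:])):
--         if not (1 <= abs(b - a) <= 3):
--             return k
--     return None
--
-- def dampDiff(numbers):
--     # Only removing an endpoint of the first bad adjacent pair can help:
--     # any other removal leaves that bad pair adjacent.
--     i = _first_bad(numbers)
--     if i is None:
--         return True, numbers
--     for p in (i, i + 1):
--         modified = numbers[:p] + numbers[p + 1:]
--         if _valid(modified):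
--             return True, modified
--     return False, numbers
-- ===== Notes on version B (the rewrite author's own statement) =====
-- stated objective: faster
-- what changed: Instead of A's scan that tries removing every index and revalidates the whole list each time, B finds the first adjacent pair whose absolute difference is outside 1..3 and tests only its two endpoints as removal candidates (any other removal leaves that bad pair adjacent), giving O(n) instead of O(n^2).
import Mathlib
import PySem

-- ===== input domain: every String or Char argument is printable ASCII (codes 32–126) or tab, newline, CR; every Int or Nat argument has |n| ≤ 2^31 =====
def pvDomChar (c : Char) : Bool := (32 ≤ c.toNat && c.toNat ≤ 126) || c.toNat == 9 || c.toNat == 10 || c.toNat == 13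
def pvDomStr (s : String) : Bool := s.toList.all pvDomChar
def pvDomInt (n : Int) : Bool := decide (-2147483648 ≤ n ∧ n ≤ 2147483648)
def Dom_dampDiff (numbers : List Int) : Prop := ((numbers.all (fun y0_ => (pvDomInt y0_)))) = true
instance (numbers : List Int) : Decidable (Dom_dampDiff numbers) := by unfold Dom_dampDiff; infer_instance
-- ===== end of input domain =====

-- B replaces A's O(n^2) try-every-removal scan by locating the first bad adjacent
-- pair and testing only its two endpoint removals (objective: faster; measured faster in a timing run).


-- ===== PORT A =====
def diffA (numbers : List Int) : Bool :=
  let deltas := (PySem.List.pyRange 1 (numbers.length : Int) 1).foldl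
    (fun acc i =>
      let dif := |PySem.List.pyGetD numbers i 0 - PySem.List.pyGetD numbers (i - 1) 0|
      if 0 < dif ∧ dif < 4 then acc ++ [true] else acc ++ [false]) []
  deltas.all id

def dampLoopA (numbers : List Int) : List Int → Bool × List Int
  | [] => (false, numbers)
  | position :: rest =>
    let modified := (PySem.List.enumerate numbers 0).foldl
      (fun acc pn => if pn.1 ≠ position then acc ++ [pn.2] else acc) []
    if diffA modified then (true, modified) else dampLoopA numbers rest

def dampDiff (numbers : List Int) : Bool × List Int :=
  let checks : Int := numbers.length
  if diffA numbers then (true, numbers)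
  else dampLoopA numbers (PySem.List.pyRange 0 checks 1)

-- ===== PORT B =====
def chkB (a b : Int) : Bool := decide (1 ≤ |b - a| ∧ |b - a| ≤ 3)

def validB (nums : List Int) : Bool :=
  (nums.zip (PySem.List.slice nums (some 1) none)).all (fun ab => chkB ab.1 ab.2)

def firstBadLoop : List (Int × (Int × Int)) → Option Int
  | [] => none
  | (k, ab) :: rest => if ¬ chkB ab.1 ab.2 then some k else firstBadLoop rest

def firstBadB (nums : List Int) : Option Int :=
  firstBadLoop (PySem.List.enumerate (nums.zip (PySem.List.slice nums (some 1) none)) 0)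

def dampDiff_alt (numbers : List Int) : Bool × List Int :=
  match firstBadB numbers with
  | none => (true, numbers)
  | some i =>
    let m1 := PySem.List.slice numbers none (some i) ++ PySem.List.slice numbers (some (i + 1)) none
    if validB m1 then (true, m1)
    else
      let m2 := PySem.List.slice numbers none (some (i + 1)) ++ PySem.List.slice numbers (some (i + 2)) none
      if validB m2 then (true, m2) else (false, numbers)

-- ===== PRECONDITION & SPEC =====
def Spec_dampDiff (numbers : List Int) (out : Bool × List Int) : Prop := out = dampDiff_alt numbers
instance (numbers : List Int) (out : Bool × List Int) : Decidable (Spec_dampDiff numbers out) := by unfold Spec_dampDiff; infer_instance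

-- ===== CLAIM (what is proved, stated in full; the proofs are below) =====
def Claim_equal_dampDiff : Prop := ∀ (numbers : List Int), Dom_dampDiff numbers → Spec_dampDiff numbers (dampDiff numbers)

-- ===== LEMMAS AND PROOFS =====

def pairsAll : List Int → Bool
  | a :: b :: t => chkB a b && pairsAll (b :: t)
  | _ => true
def fb : List Int → Option Nat
  | a :: b :: t => if chkB a b then (fb (b :: t)).map (· + 1) else some 0
  | _ => none

theorem validB_eq (xs : List Int) : validB xs = pairsAll xs := by
  induction xs using pairsAll.induct with
  | case1 a b t ih =>
    simp only [validB, PySem.List.slice_from_one, pairsAll, List.tail_cons] at *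
    rw [← ih]
    simp [List.all_cons]
  | case2 xs h => cases xs with
    | nil => simp [validB, pairsAll]
    | cons a t => cases t with
      | nil => simp [validB, pairsAll, PySem.List.slice_from_one]
      | cons b t => exact absurd rfl (h a b t)

theorem fb_none (xs : List Int) (h : fb xs = none) : pairsAll xs = true := by
  induction xs using pairsAll.induct with
  | case1 a b t ih =>
    simp [fb] at h
    by_cases hc : chkB a b = true
    · simp [hc] at h
      simp [pairsAll, hc, ih h]
    · simp [hc] at h
  | case2 xs h2 => simp [pairsAll]

theorem fb_some_bound (xs : List Int) (k : Nat) (h : fb xs = some k) : k + 1 < xs.length := by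
  induction xs using pairsAll.induct generalizing k with
  | case1 a b t ih =>
    simp [fb] at h
    by_cases hc : chkB a b = true
    · simp [hc] at h
      obtain ⟨j, hj, rfl⟩ := h
      have := ih j hj
      simp at this ⊢
      omega
    · simp [hc] at h
      simp [← h]
  | case2 xs h2 =>
    cases xs with
    | nil => simp [fb] at h
    | cons a t => cases t with
      | nil => simp [fb] at h
      | cons b t => exact absurd rfl (h2 a b t)

theorem pairsAll_cons_false (a : Int) (ys : List Int) (h : pairsAll ys = false) :
    pairsAll (a :: ys) = false := by
  cases ys with
  | nil => simp [pairsAll] at h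
  | cons b t => simp [pairsAll] at h ⊢; tauto

theorem fb_some_pairsAll (xs : List Int) (k : Nat) (h : fb xs = some k) : pairsAll xs = false := by
  induction xs using pairsAll.induct generalizing k with
  | case1 a b t ih =>
    simp [fb] at h
    by_cases hc : chkB a b = true
    · simp [hc] at h
      obtain ⟨j, hj, rfl⟩ := h
      simp [pairsAll, hc, ih j hj]
    · simp [pairsAll, hc]
  | case2 xs h2 =>
    cases xs with
    | nil => simp [fb] at h
    | cons a t => cases t with
      | nil => simp [fb] at h
      | cons b t => exact absurd rfl (h2 a b t)

theorem fb_some_erase (xs : List Int) (k : Nat) (h : fb xs = some k) (p : Nat)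
    (h1 : p ≠ k) (h2 : p ≠ k + 1) : pairsAll (xs.eraseIdx p) = false := by
  induction xs using pairsAll.induct generalizing k p with
  | case1 a b t ih =>
    simp [fb] at h
    by_cases hc : chkB a b = true
    · simp [hc] at h
      obtain ⟨j, hj, rfl⟩ := h
      cases p with
      | zero =>
        simp [List.eraseIdx]
        exact fb_some_pairsAll _ _ hj
      | succ q =>
        rw [List.eraseIdx_cons_succ]
        exact pairsAll_cons_false _ _ (ih j hj q (by omega) (by omega))
    · simp [hc] at h
      subst h
      -- k = 0, p ≥ 2
      match p, h1, h2 with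
      | q + 2, _, _ =>
        rw [List.eraseIdx_cons_succ, List.eraseIdx_cons_succ]
        simp [pairsAll, hc]
  | case2 xs h2 =>
    cases xs with
    | nil => simp [fb] at h
    | cons a t => cases t with
      | nil => simp [fb] at h
      | cons b t => exact absurd rfl (h2 a b t)

def fbp : List (Int × Int) → Option Nat
  | [] => none
  | ab :: rest => if chkB ab.1 ab.2 then (fbp rest).map (· + 1) else some 0

theorem firstBadLoop_enum (l : List (Int × Int)) (s : Int) :
    firstBadLoop (PySem.List.enumerate l s) = (fbp l).map (fun k : Nat => s + k) := by
  induction l generalizing s with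
  | nil => simp [PySem.List.enumerate_nil, firstBadLoop, fbp]
  | cons ab rest ih =>
    rw [PySem.List.enumerate_cons]
    by_cases hc : chkB ab.1 ab.2 = true
    · simp [firstBadLoop, fbp, hc, ih (s + 1)]
      cases fbp rest <;> simp
      omega
    · simp [firstBadLoop, fbp, hc]

theorem fbp_zip (xs : List Int) : fbp (xs.zip xs.tail) = fb xs := by
  induction xs using pairsAll.induct with
  | case1 a b t ih => simp [fbp, fb]; rw [← ih]; rfl
  | case2 xs h2 =>
    cases xs with
    | nil => simp [fbp, fb]
    | cons a t => cases t with
      | nil => simp [fbp, fb]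
      | cons b t => exact absurd rfl (h2 a b t)

theorem firstBadB_eq (xs : List Int) : firstBadB xs = (fb xs).map (fun k : Nat => (k : Int)) := by
  rw [firstBadB, PySem.List.slice_from_one, firstBadLoop_enum, fbp_zip]
  cases fb xs <;> simp

theorem chk_iff (a b : Int) :
    (if 0 < |b - a| ∧ |b - a| < 4 then true else false) = chkB a b := by
  unfold chkB
  generalize |b - a| = d
  split <;> rename_i h <;> simp at h ⊢ <;> omega

theorem deltas_eq (xs : List Int) :
    (PySem.List.pyRange 1 (xs.length : Int) 1).foldl
      (fun acc i =>
        let dif := |PySem.List.pyGetD xs i 0 - PySem.List.pyGetD xs (i - 1) 0|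
        if 0 < dif ∧ dif < 4 then acc ++ [true] else acc ++ [false]) []
    = (xs.zip xs.tail).map (fun ab => chkB ab.1 ab.2) := by
  have hb : ∀ (acc : List Bool) (i : Int),
      (let dif := |PySem.List.pyGetD xs i 0 - PySem.List.pyGetD xs (i - 1) 0|
       if 0 < dif ∧ dif < 4 then acc ++ [true] else acc ++ [false])
      = acc ++ [let dif := |PySem.List.pyGetD xs i 0 - PySem.List.pyGetD xs (i - 1) 0|
                if 0 < dif ∧ dif < 4 then true else false] := by
    intro acc i
    dsimp only
    split <;> rfl
  have hfe : (fun (acc : List Bool) (i : Int) =>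
      let dif := |PySem.List.pyGetD xs i 0 - PySem.List.pyGetD xs (i - 1) 0|
      if 0 < dif ∧ dif < 4 then acc ++ [true] else acc ++ [false])
      = (fun acc i =>
        acc ++ [let dif := |PySem.List.pyGetD xs i 0 - PySem.List.pyGetD xs (i - 1) 0|
                if 0 < dif ∧ dif < 4 then true else false]) := by
    funext acc i; exact hb acc i
  rw [hfe, PySem.List.foldl_append_singleton_eq_map]
  apply List.ext_getElem
  · simp [PySem.List.length_pyRange_one]
  · intro k hk1 hk2
    have hlen : k + 1 < xs.length := by
      simp [PySem.List.length_pyRange_one] at hk1; omega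
    simp only [List.nil_append] at hk1 ⊢
    rw [List.getElem_map, List.getElem_map, PySem.List.getElem_pyRange_one]
    rw [List.getElem_zip]
    have e1 : (1 : Int) + (k : Int) - 1 = ((k : Nat) : Int) := by omega
    have e2 : (1 : Int) + (k : Int) = (((k + 1 : Nat)) : Int) := by push_cast; omega
    rw [e1, e2, PySem.List.pyGetD_natCast, PySem.List.pyGetD_natCast]
    rw [List.getD_eq_getElem _ _ hlen, List.getD_eq_getElem _ _ (by omega)]
    rw [List.getElem_tail]
    exact chk_iff _ _

theorem diffA_eq (xs : List Int) : diffA xs = pairsAll xs := by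
  rw [diffA]
  dsimp only
  rw [deltas_eq, ← validB_eq, validB, PySem.List.slice_from_one]
  simp [List.all_map]

theorem modA_aux (xs : List Int) (p : Int) : ∀ (s : Int),
    ((PySem.List.enumerate xs s).filter (fun pn => pn.1 ≠ p)).map (fun pn => pn.2)
    = if s ≤ p then xs.eraseIdx (p - s).toNat else xs := by
  induction xs with
  | nil => intro s; simp [PySem.List.enumerate_nil, List.eraseIdx]
  | cons x xs ih =>
    intro s
    rw [PySem.List.enumerate_cons]
    by_cases hsp : s = p
    · subst hsp
      rw [List.filter_cons_of_neg (by simp)]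
      rw [ih (s + 1)]
      have : ¬ (s + 1 ≤ s) := by omega
      simp [this]
    · rw [List.filter_cons_of_pos (by simpa using hsp)]
      rw [List.map_cons, ih (s + 1)]
      by_cases hle : s ≤ p
      · have h1 : s + 1 ≤ p := by omega
        have h2 : (p - s).toNat = (p - (s + 1)).toNat + 1 := by omega
        simp [hle, h1, h2, List.eraseIdx_cons_succ]
      · have h1 : ¬ (s + 1 ≤ p) := by omega
        simp [hle, h1]

theorem modA_eq (xs : List Int) (p : Int) (hp : 0 ≤ p) :
    (PySem.List.enumerate xs 0).foldl
      (fun acc pn => if pn.1 ≠ p then acc ++ [pn.2] else acc) []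
    = xs.eraseIdx p.toNat := by
  have hfold := PySem.List.foldl_append_ite (l := PySem.List.enumerate xs 0)
    (p := fun pn : Int × Int => pn.1 ≠ p) (f := fun pn : Int × Int => pn.2) (acc := [])
  simp only [] at hfold
  rw [hfold, List.nil_append]
  have := modA_aux xs p 0
  simp only [hp, if_pos, Int.sub_zero] at this
  simpa [hp] using this

theorem dampLoopA_fail (xs : List Int) (ps : List Int)
    (h : ∀ q ∈ ps, 0 ≤ q ∧ pairsAll (xs.eraseIdx q.toNat) = false) :
    dampLoopA xs ps = (false, xs) := by
  induction ps with
  | nil => rfl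
  | cons q rest ih =>
    obtain ⟨hq, hfail⟩ := h q (by simp)
    rw [dampLoopA]
    rw [modA_eq xs q hq, diffA_eq, hfail]
    simp only [Bool.false_eq_true, if_false]
    exact ih (fun r hr => h r (by simp [hr]))

theorem dampLoopA_append_fail (xs : List Int) (ps1 ps2 : List Int)
    (h : ∀ q ∈ ps1, 0 ≤ q ∧ pairsAll (xs.eraseIdx q.toNat) = false) :
    dampLoopA xs (ps1 ++ ps2) = dampLoopA xs ps2 := by
  induction ps1 with
  | nil => rfl
  | cons q rest ih =>
    obtain ⟨hq, hfail⟩ := h q (by simp)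
    rw [List.cons_append, dampLoopA]
    rw [modA_eq xs q hq, diffA_eq, hfail]
    simp only [Bool.false_eq_true, if_false]
    exact ih (fun r hr => h r (by simp [hr]))

theorem m1_eq (xs : List Int) (k : Nat) :
    PySem.List.slice xs none (some (k : Int)) ++ PySem.List.slice xs (some ((k : Int) + 1)) none
    = xs.eraseIdx k := by
  have e : ((k : Int) + 1) = ((k + 1 : Nat) : Int) := by push_cast; ring
  rw [PySem.List.slice_to_natCast, e, PySem.List.slice_from_natCast,
      List.eraseIdx_eq_take_drop_succ]

theorem main_eq (xs : List Int) : dampDiff xs = dampDiff_alt xs := by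
  rw [dampDiff, dampDiff_alt, firstBadB_eq]
  cases hfb : fb xs with
  | none => simp [diffA_eq, fb_none xs hfb]
  | some k =>
    have hbound := fb_some_bound xs k hfb
    have hpa := fb_some_pairsAll xs k hfb
    simp only [diffA_eq, hpa, Bool.false_eq_true, if_false, Option.map_some]
    -- rewrite B's slices to eraseIdx
    have hm1 : PySem.List.slice xs none (some ((k : Nat) : Int)) ++
        PySem.List.slice xs (some (((k : Nat) : Int) + 1)) none = xs.eraseIdx k := m1_eq xs k
    have hc2 : ((k : Nat) : Int) + 1 = (((k + 1 : Nat)) : Int) := by push_cast; ring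
    have hc3 : ((k : Nat) : Int) + 2 = (((k + 1 : Nat)) : Int) + 1 := by push_cast; ring
    have hm2 : PySem.List.slice xs none (some (((k : Nat) : Int) + 1)) ++
        PySem.List.slice xs (some (((k : Nat) : Int) + 2)) none = xs.eraseIdx (k + 1) := by
      rw [hc2, hc3]; exact m1_eq xs (k + 1)
    -- split A's position range
    have hsplit : PySem.List.pyRange 0 (xs.length : Int) 1
        = PySem.List.pyRange 0 ((k : Nat) : Int) 1
          ++ (((k : Nat) : Int) :: (((k : Nat) : Int) + 1) :: PySem.List.pyRange (((k : Nat) : Int) + 2) (xs.length : Int) 1) := by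
      rw [PySem.List.pyRange_one_append 0 ((k : Nat) : Int) (xs.length : Int) (by omega) (by omega)]
      congr 1
      rw [PySem.List.pyRange_one_cons (by omega)]
      congr 1
      rw [PySem.List.pyRange_one_cons (by omega)]
      congr 2
    rw [hsplit, dampLoopA_append_fail]
    · rw [dampLoopA]
      rw [modA_eq xs ((k : Nat) : Int) (by omega)]
      simp only [Int.toNat_natCast, diffA_eq]
      rw [validB_eq, hm1]
      by_cases h1 : pairsAll (xs.eraseIdx k) = true
      · simp [h1]
      · simp only [h1, Bool.false_eq_true, if_false]
        conv_rhs => rw [validB_eq, hm2]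
        rw [dampLoopA]
        have hq1 : (((k : Nat) : Int) + 1) = (((k + 1 : Nat)) : Int) := hc2
        rw [hq1, modA_eq xs (((k + 1 : Nat)) : Int) (by omega)]
        simp only [Int.toNat_natCast, diffA_eq]
        by_cases h2 : pairsAll (xs.eraseIdx (k + 1)) = true
        · simp [h2]
        · simp only [h2, Bool.false_eq_true, if_false]
          apply dampLoopA_fail
          intro q hq
          rw [PySem.List.mem_pyRange_one] at hq
          refine ⟨by omega, fb_some_erase xs k hfb q.toNat (by omega) (by omega)⟩
    · intro q hq
      rw [PySem.List.mem_pyRange_one] at hq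
      refine ⟨by omega, fb_some_erase xs k hfb q.toNat (by omega) (by omega)⟩

-- ===== VERDICT (by name: the statement is the Claim_ definition above) =====
theorem dampDiff_spec : Claim_equal_dampDiff := by
  intro numbers _
  show dampDiff numbers = dampDiff_alt numbers
  exact main_eq numbers
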